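-- pv_equiv track=rewrite | github.com/romainpascual/pentomino | pentomino.py | compactmat_to_mat
-- ===== SOURCE A (Python) =====
-- def compactmat_to_mat(shape):
--     shape_matrix = []
--     max_length = 0
--     for line_count, line in enumerate(shape):
--         line = line[:]
--         shape_matrix.append([])
--         while line:
--             if len(line)%2 == 1:
--                 number = line.pop(0)
--                 shape_matrix[line_count].extend([1 for _ in range(number)])
--             else:
--                 number = line.pop(0)
--                 shape_matrix[line_count].extend([0 for _ in range(number)])
--         max_length = max(max_length, len(shape_matrix[line_count]))
--     for line in shape_matrix:
--         while len(line) < max_length: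
--             line.append(0)
--     return shape_matrix
-- ===== SOURCE B (Python) =====
-- def compactmat_to_mat(shape):
--     widths = [sum(max(c, 0) for c in line) for line in shape]
--     max_length = max(widths, default=0)
--     result = []
--     for line, w in zip(shape, widths):
--         value = len(line) % 2
--         row = []
--         for c in line:
--             row += [value] * c
--             value = 1 - value
--         row += [0] * (max_length - w)
--         result.append(row)
--     return result
-- ===== Notes on version B (the rewrite author's own statement) =====
-- stated objective: simpler
-- what changed: Replaces A's destructive pop(0)/parity-of-remaining-length decoding and second padding sweep with a widths pass plus one forward build per row (toggling value, pad appended once), avoiding the quadratic pop(0) shifting.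
import Mathlib
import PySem

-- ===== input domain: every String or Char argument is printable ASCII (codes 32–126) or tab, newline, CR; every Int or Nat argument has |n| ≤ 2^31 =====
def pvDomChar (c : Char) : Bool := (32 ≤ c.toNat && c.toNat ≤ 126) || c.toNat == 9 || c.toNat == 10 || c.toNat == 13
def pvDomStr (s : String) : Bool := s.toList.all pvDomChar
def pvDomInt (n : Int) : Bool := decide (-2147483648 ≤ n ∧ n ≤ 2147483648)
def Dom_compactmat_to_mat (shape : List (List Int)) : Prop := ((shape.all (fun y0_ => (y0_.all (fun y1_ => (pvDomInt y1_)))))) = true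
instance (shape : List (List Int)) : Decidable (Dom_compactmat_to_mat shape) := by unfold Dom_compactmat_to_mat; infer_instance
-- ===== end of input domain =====

-- B replaces A's destructive pop(0)/parity-of-remaining-length decode and second padding sweep
-- by a widths pass and one forward build per row (simpler decomposition; return value only — A
-- does not mutate its argument either, it copies each line).

-- ===== PORT A =====
-- A's inner while loop: pop the first count, emit 1s when the remaining-list length (before pop)
-- is odd, else 0s; range(n) for n < 0 is empty, matched exactly by Int.toNat.
def pvDecodeA : List Int → List Int
  | [] => []
  | n :: rest =>
      (if (n :: rest).length % 2 == 1 then List.replicate n.toNat (1 : Int)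
       else List.replicate n.toNat (0 : Int)) ++ pvDecodeA rest

def compactmat_to_mat (shape : List (List Int)) : List (List Int) :=
  -- first loop: build each row and track max_length
  let st := shape.foldl
    (fun (st : List (List Int) × Nat) line =>
      let row := pvDecodeA line
      (st.1 ++ [row], max st.2 row.length)) ([], 0)
  -- second loop: pad every row with zeros up to max_length
  st.1.map (fun r => r ++ List.replicate (st.2 - r.length) 0)

-- ===== PORT B =====
def pvWidthB (line : List Int) : Int := line.foldl (fun s c => s + max c 0) 0

def pvRowB : Int → List Int → List Int
  | _, [] => []
  | v, c :: rest => List.replicate c.toNat v ++ pvRowB (1 - v) rest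

def compactmat_to_mat_alt (shape : List (List Int)) : List (List Int) :=
  let widths := shape.map pvWidthB
  let maxLen := widths.foldl max 0
  (shape.zip widths).map
    (fun p => pvRowB ((p.1.length : Int) % 2) p.1 ++ List.replicate (maxLen - p.2).toNat 0)

-- ===== PRECONDITION & SPEC =====
def Spec_compactmat_to_mat (shape : List (List Int)) (out : List (List Int)) : Prop := out = compactmat_to_mat_alt shape
instance (shape : List (List Int)) (out : List (List Int)) : Decidable (Spec_compactmat_to_mat shape out) := by unfold Spec_compactmat_to_mat; infer_instance

-- ===== CLAIM (what is proved, stated in full; the proofs are below) =====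
def Claim_equal_compactmat_to_mat : Prop := ∀ (shape : List (List Int)), Dom_compactmat_to_mat shape → Spec_compactmat_to_mat shape (compactmat_to_mat shape)

-- ===== LEMMAS AND PROOFS =====

-- the two per-row decoders agree when B's value seed is the parity of the row length
theorem pvRowB_eq_decodeA : ∀ (l : List Int), pvRowB ((l.length : Int) % 2) l = pvDecodeA l := by
  intro l
  induction l with
  | nil => rfl
  | cons n rest ih =>
      show List.replicate n.toNat (((n :: rest).length : Int) % 2) ++
             pvRowB (1 - ((n :: rest).length : Int) % 2) rest = _
      rcases Nat.even_or_odd rest.length with h | h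
      · have h2 : rest.length % 2 = 0 := Nat.even_iff.mp h
        have hv : (((n :: rest).length : Int) % 2) = 1 := by
          simp only [List.length_cons]; omega
        rw [hv, show (1 : Int) - 1 = ((rest.length : Int) % 2) from by omega, ih]
        simp [pvDecodeA, Nat.succ_mod_two_eq_one_iff, h2]
      · have h2 : rest.length % 2 = 1 := Nat.odd_iff.mp h
        have hv : (((n :: rest).length : Int) % 2) = 0 := by
          simp only [List.length_cons]; omega
        rw [hv, show (1 : Int) - 0 = ((rest.length : Int) % 2) from by omega, ih]
        simp [pvDecodeA, Nat.succ_mod_two_eq_one_iff, h2]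

-- the decoded row's length equals B's width
theorem pvWidthB_go (l : List Int) : ∀ (s : Int),
    l.foldl (fun s c => s + max c 0) s = s + ((pvDecodeA l).length : Int) := by
  induction l with
  | nil => intro s; simp [pvDecodeA]
  | cons n rest ih =>
      intro s
      simp only [List.foldl_cons, ih, pvDecodeA]
      split <;> simp <;> omega

theorem pvWidthB_eq (l : List Int) : pvWidthB l = ((pvDecodeA l).length : Int) := by
  simpa using pvWidthB_go l 0

-- A's fold that builds rows and max_length, characterised
theorem foldA_char (shape : List (List Int)) : ∀ (acc : List (List Int)) (m : Nat),
    shape.foldl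
      (fun (st : List (List Int) × Nat) line =>
        let row := pvDecodeA line
        (st.1 ++ [row], max st.2 row.length)) (acc, m)
    = (acc ++ shape.map pvDecodeA,
       (shape.map pvDecodeA).foldl (fun m r => max m r.length) m) := by
  induction shape with
  | nil => intro acc m; simp
  | cons l rest ih =>
      intro acc m
      simp only [List.foldl_cons, List.map_cons, ih]
      simp

-- the two max-length folds agree (cast over ℤ)
theorem maxLen_cast (shape : List (List Int)) : ∀ (m : Nat),
    (((shape.map pvDecodeA).foldl (fun m r => max m r.length) m : Nat) : Int)
      = (shape.map pvWidthB).foldl max ((m : Nat) : Int) := by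
  induction shape with
  | nil => intro m; simp
  | cons l rest ih =>
      intro m
      rw [List.map_cons, List.foldl_cons, List.map_cons, List.foldl_cons, ih]
      congr 1
      rw [pvWidthB_eq]
      push_cast
      omega

-- zip of a list with a mapped copy of itself
theorem zip_map_self (shape : List (List Int)) :
    shape.zip (shape.map pvWidthB) = shape.map (fun l => (l, pvWidthB l)) := by
  induction shape with
  | nil => rfl
  | cons l rest ih => simp [List.zip_cons_cons, ih]

-- ===== VERDICT (by name: the statement is the Claim_ definition above) =====
theorem compactmat_to_mat_spec : Claim_equal_compactmat_to_mat := by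
  intro shape _
  show compactmat_to_mat shape = compactmat_to_mat_alt shape
  unfold compactmat_to_mat compactmat_to_mat_alt
  rw [show (([], 0) : List (List Int) × Nat) = (([] : List (List Int)), (0 : Nat)) from rfl,
      foldA_char]
  simp only [List.nil_append]
  have h0 := maxLen_cast shape 0
  rw [Nat.cast_zero] at h0
  rw [← h0, zip_map_self]
  simp only [List.map_map]
  apply List.map_congr_left
  intro l _
  simp only [Function.comp]
  rw [pvRowB_eq_decodeA, pvWidthB_eq]
  congr 1
  congr 1
  omega
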